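-- pv_equiv track=rewrite | github.com/microsoft/debug-gym | analysis/trajectory_filtering/criteria.py | has_rewrite_soon_after_pdb
-- ===== SOURCE A (Python) =====
-- def has_rewrite_soon_after_pdb(trajectory, max_steps_between=10):
--     """
--     Check if there are rewrite tool calls within max_steps_between steps after pdb tool calls.
--     This is a more precise check to ensure the pdb and rewrite calls are temporally related.
--
--     Args:
--         trajectory: List of trajectory steps (log entries)
--         max_steps_between: Maximum number of steps allowed between pdb and rewrite calls
--
--     Returns:
--         bool: True if there's at least one rewrite call within max_steps_between steps after a pdb call
--     """
--     for i, step in enumerate(trajectory):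
--         action = step.get("action")
--         if action and action.get("name") == "pdb":
--             # Look ahead for rewrite calls within the specified window
--             for j in range(i + 1, min(i + 1 + max_steps_between, len(trajectory))):
--                 next_step = trajectory[j]
--                 next_action = next_step.get("action")
--                 if next_action and next_action.get("name") == "rewrite":
--                     return True
--
--     return False
-- ===== SOURCE B (Python) =====
-- def has_rewrite_soon_after_pdb(trajectory, max_steps_between=10):
--     """Index-table + two-pointer reformulation: collect pdb/rewrite indices, then merge-scan."""
--     def action_name(step):
--         action = step.get("action")
--         return action.get("name") if action else None
--
--     pdb_idx = [i for i, s in enumerate(trajectory) if action_name(s) == "pdb"]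
--     rew_idx = [i for i, s in enumerate(trajectory) if action_name(s) == "rewrite"]
--
--     pi = ri = 0
--     while pi < len(pdb_idx) and ri < len(rew_idx):
--         p, r = pdb_idx[pi], rew_idx[ri]
--         if r <= p:
--             ri += 1
--         elif r - p > max_steps_between:
--             pi += 1
--         else:
--             return True
--     return False
-- ===== Notes on version B (the rewrite author's own statement) =====
-- stated objective: alternative
-- what changed: Replaces A's nested lookahead scan (for each pdb step, rescan the next max_steps_between steps for a rewrite) by one pass that collects the pdb and rewrite index tables and a sorted two-pointer merge scan over the two tables.
import Mathlib
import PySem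

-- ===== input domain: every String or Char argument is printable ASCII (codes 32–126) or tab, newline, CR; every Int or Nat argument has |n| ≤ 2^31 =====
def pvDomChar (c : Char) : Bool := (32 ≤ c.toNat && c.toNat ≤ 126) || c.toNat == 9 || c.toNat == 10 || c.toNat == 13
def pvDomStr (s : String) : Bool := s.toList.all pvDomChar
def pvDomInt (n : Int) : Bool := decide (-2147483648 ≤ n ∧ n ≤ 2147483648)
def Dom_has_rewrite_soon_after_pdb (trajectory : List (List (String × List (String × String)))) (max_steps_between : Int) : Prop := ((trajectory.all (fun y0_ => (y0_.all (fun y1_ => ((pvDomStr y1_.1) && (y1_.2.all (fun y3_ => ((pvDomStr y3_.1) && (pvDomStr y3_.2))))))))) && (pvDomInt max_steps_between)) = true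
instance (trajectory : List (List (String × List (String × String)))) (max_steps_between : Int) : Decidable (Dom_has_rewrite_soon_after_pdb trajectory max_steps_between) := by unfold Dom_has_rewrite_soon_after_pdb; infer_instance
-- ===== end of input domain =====

-- B replaces A's nested lookahead scan by collecting pdb/rewrite index tables in one pass
-- and merging them with a two-pointer scan (objective: alternative decomposition, same cost in practice).

-- ===== PORT A =====
def has_rewrite_soon_after_pdb (trajectory : List (List (String × List (String × String)))) (max_steps_between : Int) : Bool :=
  (PySem.List.enumerate trajectory 0).any (fun is =>
    (match List.lookup "action" is.2 with
     | none => false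
     | some action => decide (action ≠ []) && (List.lookup "name" action == some "pdb"))
    &&
    (PySem.List.pyRange (is.1 + 1) (min (is.1 + 1 + max_steps_between) (trajectory.length : Int)) 1).any (fun j =>
      match PySem.List.pyGet? trajectory j with
      | none => false   -- unreachable: j is always in range; Python never raises here
      | some next_step =>
        match List.lookup "action" next_step with
        | none => false
        | some na => decide (na ≠ []) && (List.lookup "name" na == some "rewrite")))

-- ===== PORT B =====
def pvB_actionName (step : List (String × List (String × String))) : Option String :=
  match List.lookup "action" step with
  | none => none
  | some action => if action = [] then none else List.lookup "name" action

def pvB_scan (P R : List Int) (m : Int) : Bool :=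
  match P, R with
  | _, [] => false
  | [], _ :: _ => false
  | p :: ps, r :: rs =>
    if r ≤ p then pvB_scan (p :: ps) rs m
    else if r - p > m then pvB_scan ps (r :: rs) m
    else true
termination_by P.length + R.length

def has_rewrite_soon_after_pdb_alt (trajectory : List (List (String × List (String × String)))) (max_steps_between : Int) : Bool :=
  let P := (PySem.List.enumerate trajectory 0).filterMap
    (fun is => if pvB_actionName is.2 = some "pdb" then some is.1 else none)
  let R := (PySem.List.enumerate trajectory 0).filterMap
    (fun is => if pvB_actionName is.2 = some "rewrite" then some is.1 else none)
  pvB_scan P R max_steps_between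

-- ===== PRECONDITION & SPEC =====
def Spec_has_rewrite_soon_after_pdb (trajectory : List (List (String × List (String × String)))) (max_steps_between : Int) (out : Bool) : Prop := out = has_rewrite_soon_after_pdb_alt trajectory max_steps_between
instance (trajectory : List (List (String × List (String × String)))) (max_steps_between : Int) (out : Bool) : Decidable (Spec_has_rewrite_soon_after_pdb trajectory max_steps_between out) := by unfold Spec_has_rewrite_soon_after_pdb; infer_instance

-- ===== CLAIM (what is proved, stated in full; the proofs are below) =====
def Claim_equal_has_rewrite_soon_after_pdb : Prop := ∀ (trajectory : List (List (String × List (String × String)))) (max_steps_between : Int), Dom_has_rewrite_soon_after_pdb trajectory max_steps_between → Spec_has_rewrite_soon_after_pdb trajectory max_steps_between (has_rewrite_soon_after_pdb trajectory max_steps_between)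

-- ===== LEMMAS AND PROOFS =====

-- the common "a rewrite follows a pdb within the window" predicate both ports decide
def pvGood (trajectory : List (List (String × List (String × String)))) (m : Int) : Prop :=
  ∃ p r : Nat, p < r ∧ r < trajectory.length ∧ (r : Int) ≤ (p : Int) + m ∧
    pvB_actionName (trajectory.getD p []) = some "pdb" ∧
    pvB_actionName (trajectory.getD r []) = some "rewrite"

theorem pvMatch_eq (step : List (String × List (String × String))) (nm : String) :
    (match List.lookup "action" step with
     | none => false
     | some action => decide (action ≠ []) && (List.lookup "name" action == some nm))
      = (pvB_actionName step == some nm) := by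
  unfold pvB_actionName
  cases List.lookup "action" step with
  | none => simp
  | some a =>
    by_cases h : a = [] <;> simp [h]

theorem pvA_iff (traj : List (List (String × List (String × String)))) (m : Int) :
    has_rewrite_soon_after_pdb traj m = true ↔ pvGood traj m := by
  unfold has_rewrite_soon_after_pdb pvGood
  simp only [pvMatch_eq, List.any_eq_true, Bool.and_eq_true,
    PySem.List.mem_enumerate_iff, PySem.List.mem_pyRange_one]
  constructor
  · rintro ⟨is, ⟨k, hk, rfl⟩, hpdb, j, ⟨hj1, hj2⟩, hrew⟩
    simp only [zero_add] at hj1 hj2 hpdb hrew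
    have hj0 : (0:Int) ≤ j := by omega
    have hjlen : j < (traj.length : Int) := lt_of_lt_of_le hj2 (min_le_right _ _)
    have hjw : j < (k : Int) + 1 + m := lt_of_lt_of_le hj2 (min_le_left _ _)
    have hget : PySem.List.pyGet? traj j = some traj[j.toNat] :=
      PySem.List.pyGet?_eq_some_getElem traj hj0 (by omega)
    rw [hget] at hrew
    refine ⟨k, j.toNat, by omega, by omega, by omega, ?_, ?_⟩
    · rw [List.getD_eq_getElem _ _ hk]; exact beq_iff_eq.mp hpdb
    · rw [List.getD_eq_getElem _ _ (by omega)]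
      exact beq_iff_eq.mp hrew
  · rintro ⟨p, r, hpr, hrlen, hwin, hpdb, hrew⟩
    have hplen : p < traj.length := lt_trans hpr hrlen
    rw [List.getD_eq_getElem _ _ hplen] at hpdb
    rw [List.getD_eq_getElem _ _ hrlen] at hrew
    refine ⟨((0:Int) + p, traj[p]), ⟨p, hplen, rfl⟩, by simpa using beq_iff_eq.mpr hpdb,
      (r : Int), ⟨by push_cast; omega, ?_⟩, ?_⟩
    · refine lt_min (by push_cast; omega) (by exact_mod_cast hrlen)
    · have hget : PySem.List.pyGet? traj (r : Int) = some traj[r] := by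
        rw [PySem.List.pyGet?_natCast]; simp [hrlen]
      rw [hget]; exact beq_iff_eq.mpr hrew

-- membership in the collected index tables
theorem pvMem_table (traj : List (List (String × List (String × String)))) (nm : String) (x : Int) :
    x ∈ (PySem.List.enumerate traj 0).filterMap
        (fun is => if pvB_actionName is.2 = some nm then some is.1 else none)
      ↔ ∃ k : Nat, k < traj.length ∧ x = (k : Int) ∧ pvB_actionName (traj.getD k []) = some nm := by
  simp only [List.mem_filterMap, PySem.List.mem_enumerate_iff]
  constructor
  · rintro ⟨is, ⟨k, hk, rfl⟩, hsome⟩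
    split at hsome
    · next h =>
      refine ⟨k, hk, by simpa using hsome.symm, ?_⟩
      rw [List.getD_eq_getElem _ _ hk]; exact h
    · exact absurd hsome (by simp)
  · rintro ⟨k, hk, rfl, hnm⟩
    rw [List.getD_eq_getElem _ _ hk] at hnm
    exact ⟨((0:Int) + k, traj[k]), ⟨k, hk, rfl⟩, by simp [hnm]⟩

theorem pvTable_sorted (traj : List (List (String × List (String × String)))) (nm : String) :
    ((PySem.List.enumerate traj 0).filterMap
        (fun is => if pvB_actionName is.2 = some nm then some is.1 else none)).Pairwise (· ≤ ·) := by
  have h := PySem.List.pairwise_lt_enumerate traj (s := 0)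
  refine List.Pairwise.filterMap _ (fun a b hab x hx y hy => ?_) h
  have hx' : x = a.1 := by
    by_cases hc : pvB_actionName a.2 = some nm
    · simp [hc] at hx; omega
    · simp [hc] at hx
  have hy' : y = b.1 := by
    by_cases hc : pvB_actionName b.2 = some nm
    · simp [hc] at hy; omega
    · simp [hc] at hy
  subst hx' hy'; exact le_of_lt hab

theorem pvB_scan_iff (P R : List Int) (m : Int)
    (hP : P.Pairwise (· ≤ ·)) (hR : R.Pairwise (· ≤ ·)) :
    pvB_scan P R m = true ↔ ∃ p ∈ P, ∃ r ∈ R, p < r ∧ r - p ≤ m := by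
  fun_induction pvB_scan P R m with
  | case1 _ => simp
  | case2 _ _ => simp
  | case3 p ps r rs hle ih =>
    rw [ih hP (List.Pairwise.sublist (List.sublist_cons_self r rs) hR)]
    constructor
    · rintro ⟨p', hp', r', hr', h1, h2⟩
      exact ⟨p', hp', r', List.mem_cons_of_mem _ hr', h1, h2⟩
    · rintro ⟨p', hp', r', hr', h1, h2⟩
      rcases List.mem_cons.mp hr' with rfl | hr''
      · exfalso
        rcases List.mem_cons.mp hp' with rfl | hp''
        · omega
        · have := (List.pairwise_cons.mp hP).1 p' hp''; omega
      · exact ⟨p', hp', r', hr'', h1, h2⟩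
  | case4 p ps r rs hle hgt ih =>
    rw [ih (List.Pairwise.sublist (List.sublist_cons_self p ps) hP) hR]
    constructor
    · rintro ⟨p', hp', r', hr', h1, h2⟩
      exact ⟨p', List.mem_cons_of_mem _ hp', r', hr', h1, h2⟩
    · rintro ⟨p', hp', r', hr', h1, h2⟩
      rcases List.mem_cons.mp hp' with rfl | hp''
      · exfalso
        rcases List.mem_cons.mp hr' with rfl | hr''
        · omega
        · have := (List.pairwise_cons.mp hR).1 r' hr''; omega
      · exact ⟨p', hp'', r', hr', h1, h2⟩
  | case5 p ps r rs hle hgt =>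
    simp only [true_iff]
    exact ⟨p, List.mem_cons_self, r, List.mem_cons_self, by omega, by omega⟩

theorem pvB_iff (traj : List (List (String × List (String × String)))) (m : Int) :
    has_rewrite_soon_after_pdb_alt traj m = true ↔ pvGood traj m := by
  unfold has_rewrite_soon_after_pdb_alt pvGood
  rw [pvB_scan_iff _ _ _ (pvTable_sorted traj "pdb") (pvTable_sorted traj "rewrite")]
  simp only [pvMem_table]
  constructor
  · rintro ⟨p, ⟨kp, hkp, rfl, hp⟩, r, ⟨kr, hkr, rfl, hr⟩, h1, h2⟩
    exact ⟨kp, kr, by exact_mod_cast h1, hkr, by omega, hp, hr⟩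
  · rintro ⟨p, r, hpr, hrlen, hwin, hp, hr⟩
    exact ⟨(p : Int), ⟨p, lt_trans hpr hrlen, rfl, hp⟩,
      (r : Int), ⟨r, hrlen, rfl, hr⟩, by exact_mod_cast hpr, by omega⟩

-- ===== VERDICT (by name: the statement is the Claim_ definition above) =====
theorem has_rewrite_soon_after_pdb_spec : Claim_equal_has_rewrite_soon_after_pdb := by
  intro traj m _
  unfold Spec_has_rewrite_soon_after_pdb
  have ha := pvA_iff traj m
  have hb := pvB_iff traj m
  cases h1 : has_rewrite_soon_after_pdb traj m <;>
    cases h2 : has_rewrite_soon_after_pdb_alt traj m <;>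
      simp_all
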